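-- pv_equiv track=rewrite | github.com/styjii/exercise_univerity | base/Base.py | setToNumber
-- ===== SOURCE A (Python) =====
-- def setToNumber(element : str) :
--     character = ['A', 'B', 'C', 'D', 'E', 'F']
--     number_of_each_character = [10, 11, 12, 13, 14, 15]
--     i = 0
--     while i < len(character) :
--         if element == character[i] :
--             return number_of_each_character[i]
--         i += 1
-- ===== SOURCE B (Python) =====
-- def setToNumber(element):
--     if isinstance(element, str) and len(element) == 1 and 'A' <= element <= 'F':
--         return ord(element) - 55
-- ===== Notes on version B (the rewrite author's own statement) =====
-- stated objective: idiomatic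
-- what changed: Replaced the parallel-list linear scan with a closed-form arithmetic map: a single-character range check 'A'<=element<='F' and ord(element)-55.
import Mathlib
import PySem

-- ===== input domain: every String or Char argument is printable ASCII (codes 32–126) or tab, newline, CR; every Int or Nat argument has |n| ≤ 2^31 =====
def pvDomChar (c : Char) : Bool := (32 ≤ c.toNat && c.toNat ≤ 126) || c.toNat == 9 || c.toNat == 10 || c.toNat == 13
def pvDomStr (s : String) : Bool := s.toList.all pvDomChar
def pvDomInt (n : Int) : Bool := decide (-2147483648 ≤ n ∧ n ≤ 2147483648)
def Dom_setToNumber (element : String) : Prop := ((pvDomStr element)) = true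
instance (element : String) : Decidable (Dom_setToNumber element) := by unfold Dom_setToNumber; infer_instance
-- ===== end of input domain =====

-- B replaces A's scan over two parallel lists with the closed-form map ord(c) - 55 guarded by a single-character 'A'..'F' range check (idiomatic; same values).

-- ===== PORT A =====
-- the while loop over index i into the two parallel lists
def setToNumberGo (element : String) (character : List String) (numbers : List Int) (i : Nat) : Option Int :=
  if i < character.length then
    if element = character.getD i "" then some (numbers.getD i 0)
    else setToNumberGo element character numbers (i + 1)
  else none
termination_by character.length - i

def setToNumber (element : String) : Option Int :=
  setToNumberGo element ["A", "B", "C", "D", "E", "F"] [10, 11, 12, 13, 14, 15] 0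

-- ===== PORT B =====
def setToNumber_alt (element : String) : Option Int :=
  match element.toList with
  | [c] => if 'A' ≤ c ∧ c ≤ 'F' then some ((c.toNat : Int) - 55) else none
  | _ => none

-- ===== PRECONDITION & SPEC =====
def Spec_setToNumber (element : String) (out : Option Int) : Prop := out = setToNumber_alt element
instance (element : String) (out : Option Int) : Decidable (Spec_setToNumber element out) := by unfold Spec_setToNumber; infer_instance

-- ===== CLAIM (what is proved, stated in full; the proofs are below) =====
def Claim_equal_setToNumber : Prop := ∀ (element : String), Dom_setToNumber element → Spec_setToNumber element (setToNumber element)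

-- ===== LEMMAS AND PROOFS =====

-- A's loop, unrolled to the chain of equality tests it performs
theorem setToNumber_unrolled (element : String) :
    setToNumber element =
      if element = "A" then some 10 else if element = "B" then some 11
      else if element = "C" then some 12 else if element = "D" then some 13
      else if element = "E" then some 14 else if element = "F" then some 15
      else none := by
  unfold setToNumber
  rw [setToNumberGo, setToNumberGo, setToNumberGo, setToNumberGo, setToNumberGo,
      setToNumberGo, setToNumberGo]
  simp

-- a character in the closed range ['A','F'] is one of the six letters
theorem char_range_cases (c : Char) (h1 : 'A' ≤ c) (h2 : c ≤ 'F') :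
    c = 'A' ∨ c = 'B' ∨ c = 'C' ∨ c = 'D' ∨ c = 'E' ∨ c = 'F' := by
  simp only [Char.le_def, UInt32.le_iff_toNat_le] at h1 h2
  have e1 : ('A'.val.toNat) = 65 := by decide
  have e2 : ('F'.val.toNat) = 70 := by decide
  rw [e1] at h1; rw [e2] at h2
  have hofn : Char.ofNat c.val.toNat = c := Char.ofNat_toNat c
  have hv : c.val.toNat = 65 ∨ c.val.toNat = 66 ∨ c.val.toNat = 67 ∨ c.val.toNat = 68 ∨
      c.val.toNat = 69 ∨ c.val.toNat = 70 := by omega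
  rcases hv with h|h|h|h|h|h <;> rw [h] at hofn <;> rw [← hofn] <;> simp

-- ===== VERDICT (by name: the statement is the Claim_ definition above) =====
theorem setToNumber_spec : Claim_equal_setToNumber := by
  intro element _
  unfold Spec_setToNumber setToNumber_alt
  rw [setToNumber_unrolled]
  have tA : "A".toList = ['A'] := by decide
  have tB : "B".toList = ['B'] := by decide
  have tC : "C".toList = ['C'] := by decide
  have tD : "D".toList = ['D'] := by decide
  have tE : "E".toList = ['E'] := by decide
  have tF : "F".toList = ['F'] := by decide
  match h : element.toList with
  | [] =>
    simp only [String.ext_iff, h, tA, tB, tC, tD, tE, tF]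
    simp
  | [c] =>
    simp only [String.ext_iff, h, tA, tB, tC, tD, tE, tF]
    by_cases hr : 'A' ≤ c ∧ c ≤ 'F'
    · rcases char_range_cases c hr.1 hr.2 with rfl|rfl|rfl|rfl|rfl|rfl <;> decide
    · rw [if_neg hr]
      split_ifs with h1 h2 h3 h4 h5 h6 <;> try rfl
      all_goals first
        | (exfalso; apply hr;
           first
             | (rw [show c = 'A' by simpa using h1]; exact ⟨by decide, by decide⟩)
             | (rw [show c = 'B' by simpa using h2]; exact ⟨by decide, by decide⟩)
             | (rw [show c = 'C' by simpa using h3]; exact ⟨by decide, by decide⟩)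
             | (rw [show c = 'D' by simpa using h4]; exact ⟨by decide, by decide⟩)
             | (rw [show c = 'E' by simpa using h5]; exact ⟨by decide, by decide⟩)
             | (rw [show c = 'F' by simpa using h6]; exact ⟨by decide, by decide⟩))
  | c :: d :: rest =>
    simp only [String.ext_iff, h, tA, tB, tC, tD, tE, tF]
    simp
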